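-- pv_equiv track=rewrite | github.com/shuttlego/shuttlego.github.io | load_data.py | _sort_report_departure_times
-- ===== SOURCE A (Python) =====
-- def _sort_report_departure_times(values: set[str]) -> list[str]:
--     def _time_sort_key(value: str) -> tuple[int, str]:
--         clean = str(value or "").strip()
--         minutes = _time_to_minutes(clean)
--         return (minutes if minutes >= 0 else 9999, clean)
--
--     return sorted(
--         {str(value or "").strip() for value in values if str(value or "").strip()},
--         key=_time_sort_key,
--     )
--
-- def _time_to_minutes(t: str) -> int:
--     """'HH:MM' → 분 단위 (0~1439)."""
--     parts = t.strip().split(":")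
--     if len(parts) != 2:
--         return -1
--     try:
--         h, m = int(parts[0]), int(parts[1])
--         if 0 <= h <= 23 and 0 <= m <= 59:
--             return h * 60 + m
--     except ValueError:
--         pass
--     return -1
-- ===== SOURCE B (Python) =====
-- def _time_to_minutes(t: str) -> int:
--     parts = t.strip().split(":")
--     if len(parts) != 2:
--         return -1
--     try:
--         h, m = int(parts[0]), int(parts[1])
--         if 0 <= h <= 23 and 0 <= m <= 59:
--             return h * 60 + m
--     except ValueError:
--         pass
--     return -1
--
--
-- def _sort_report_departure_times(values):
--     cleaned = {str(v or "").strip() for v in values if str(v or "").strip()}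
--     valid = sorted(
--         (c for c in cleaned if _time_to_minutes(c) >= 0),
--         key=lambda c: (_time_to_minutes(c), c),
--     )
--     invalid = sorted(c for c in cleaned if _time_to_minutes(c) < 0)
--     return valid + invalid
-- ===== Notes on version B (the rewrite author's own statement) =====
-- stated objective: alternative
-- what changed: Instead of one sort of the whole deduped set under a sentinel tuple key, B partitions the deduped set into valid times and non-times, sorts the valid bucket by (minutes, text) and the invalid bucket by text alone, and concatenates.
import Mathlib
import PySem

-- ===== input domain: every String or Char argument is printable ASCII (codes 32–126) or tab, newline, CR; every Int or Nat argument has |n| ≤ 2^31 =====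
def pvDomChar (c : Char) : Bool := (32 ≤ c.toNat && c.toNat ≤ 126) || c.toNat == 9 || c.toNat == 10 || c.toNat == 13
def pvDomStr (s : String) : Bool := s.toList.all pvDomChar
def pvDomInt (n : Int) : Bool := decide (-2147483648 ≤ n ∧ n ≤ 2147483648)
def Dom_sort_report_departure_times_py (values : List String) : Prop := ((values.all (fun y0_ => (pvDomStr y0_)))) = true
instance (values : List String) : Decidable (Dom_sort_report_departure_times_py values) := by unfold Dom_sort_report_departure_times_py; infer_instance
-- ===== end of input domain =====

-- B replaces A's single sort under a sentinel tuple key by a partition of the deduped set into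
-- valid times (sorted by (minutes, text)) and non-times (sorted by text), concatenated (objective: alternative).

-- shared module helper _time_to_minutes (used verbatim by both Pythons)
def pvTimeToMinutes (t : String) : Int :=
  match PySem.Str.split? (PySem.Str.strip t) ":" with
  | some [p0, p1] =>
      match PySem.Int.ofStr? p0, PySem.Int.ofStr? p1 with
      | some h, some m => if 0 ≤ h ∧ h ≤ 23 ∧ 0 ≤ m ∧ m ≤ 59 then h * 60 + m else -1
      | _, _ => -1
  | _ => -1

-- str(value or "").strip()
def pvClean (v : String) : String := PySem.Str.strip (if v == "" then "" else v)

-- ===== PORT A =====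
def sort_report_departure_times_py (values : List String) : List String :=
  PySem.List.sorted2
    (PySem.Set.ofList ((values.map pvClean).filter (fun c => !(c == ""))))
    (fun value =>
      let clean := PySem.Str.strip value
      let minutes := pvTimeToMinutes clean
      if minutes ≥ 0 then minutes else 9999)
    (fun value => PySem.Str.strip value)

-- ===== PORT B =====
def sort_report_departure_times_py_alt (values : List String) : List String :=
  let cleaned := PySem.Set.ofList ((values.map pvClean).filter (fun c => !(c == "")))
  PySem.List.sorted2 (cleaned.filter (fun c => decide (pvTimeToMinutes c ≥ 0)))
      (fun c => pvTimeToMinutes c) (fun c => c)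
    ++ PySem.List.sorted (cleaned.filter (fun c => decide (pvTimeToMinutes c < 0))) (fun c => c)

-- ===== PRECONDITION & SPEC =====
def Spec_sort_report_departure_times_py (values : List String) (out : List String) : Prop := out = sort_report_departure_times_py_alt values
instance (values : List String) (out : List String) : Decidable (Spec_sort_report_departure_times_py values out) := by unfold Spec_sort_report_departure_times_py; infer_instance

-- ===== CLAIM (what is proved, stated in full; the proofs are below) =====
def Claim_equal_sort_report_departure_times_py : Prop := ∀ (values : List String), Dom_sort_report_departure_times_py values → Spec_sort_report_departure_times_py values (sort_report_departure_times_py values)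

-- ===== LEMMAS AND PROOFS =====

theorem pv_sorted2_eq_sorted_toLex (xs : List String) (k1 : String → Int) (k2 : String → String) :
    PySem.List.sorted2 xs k1 k2 = PySem.List.sorted xs (fun x => toLex (k1 x, k2 x)) := by
  rw [PySem.List.sorted_eq_foldl_insertBy]
  show xs.foldl (fun acc x => PySem.List.insertBy
      (fun a b => decide (k1 a < k1 b) || (!decide (k1 b < k1 a) && decide (k2 a < k2 b))) x acc) []
    = xs.foldl (fun acc x => PySem.List.insertBy
      (fun a b => decide (toLex (k1 a, k2 a) < toLex (k1 b, k2 b))) x acc) []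
  have hf : (fun (a b : String) => decide (k1 a < k1 b) || (!decide (k1 b < k1 a) && decide (k2 a < k2 b)))
      = (fun a b => decide (toLex (k1 a, k2 a) < toLex (k1 b, k2 b))) := by
    funext a b
    rcases lt_trichotomy (k1 a) (k1 b) with h | h | h
    · simp [Prod.Lex.toLex_lt_toLex, h]
    · simp [Prod.Lex.toLex_lt_toLex, h, lt_irrefl]
    · simp [Prod.Lex.toLex_lt_toLex, h, not_lt_of_gt h, ne_of_gt h]
  rw [hf]

theorem pv_dropWhile_dropWhile {α : Type} (p : α → Bool) (l : List α) :
    (l.dropWhile p).dropWhile p = l.dropWhile p := by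
  induction l with
  | nil => simp
  | cons h t ih =>
    by_cases hp : p h <;> simp [List.dropWhile_cons, hp, ih]

theorem pv_chars_strip_idem (s : List Char) :
    PySem.Chars.strip (PySem.Chars.strip s) = PySem.Chars.strip s := by
  unfold PySem.Chars.strip PySem.Chars.lstrip PySem.Chars.rstrip
  set p := PySem.Chars.isspace
  set u := s.dropWhile p with hu
  set t := (u.reverse.dropWhile p).reverse with ht
  have htp : t <+: u := by
    have h1 : u.reverse.dropWhile p <:+ u.reverse := List.dropWhile_suffix p
    have h2 := List.reverse_prefix.mpr h1
    simpa using h2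
  have hdw : t.dropWhile p = t := by
    cases hte : t with
    | nil => simp
    | cons h tl =>
      have hhu : ∃ utl, u = h :: utl := by
        rcases htp with ⟨r, hr⟩
        rw [hte] at hr
        exact ⟨tl ++ r, by simpa using hr.symm⟩
      rcases hhu with ⟨utl, hu2⟩
      have hne : s.dropWhile p ≠ [] := by rw [← hu, hu2]; simp
      have hph' := List.head_dropWhile_not p hne
      have h3 : s.dropWhile p = h :: utl := hu.symm.trans hu2
      have hph : p h = false := by simpa [h3] using hph'
      simp [hph]
  rw [hdw, ht, List.reverse_reverse, pv_dropWhile_dropWhile]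

theorem pv_str_strip_idem (s : String) :
    PySem.Str.strip (PySem.Str.strip s) = PySem.Str.strip s := by
  simp [PySem.Str.strip, pv_chars_strip_idem]

theorem pv_ttm_cases (c : String) :
    pvTimeToMinutes c = -1 ∨ (0 ≤ pvTimeToMinutes c ∧ pvTimeToMinutes c ≤ 1439) := by
  unfold pvTimeToMinutes
  repeat' split
  all_goals first | (left; rfl) | (right; constructor <;> omega)

theorem pv_main (values : List String) :
    sort_report_departure_times_py values = sort_report_departure_times_py_alt values := by
  unfold sort_report_departure_times_py sort_report_departure_times_py_alt
  simp only []
  rw [pv_sorted2_eq_sorted_toLex, pv_sorted2_eq_sorted_toLex]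
  set S := PySem.Set.ofList ((values.map pvClean).filter (fun c => !(c == ""))) with hS
  set V := S.filter (fun c => decide (pvTimeToMinutes c ≥ 0)) with hV
  set I := S.filter (fun c => decide (pvTimeToMinutes c < 0)) with hI
  set KV : String → ℤ ×ₗ String := fun c => toLex (pvTimeToMinutes c, c) with hKV
  set K : String → ℤ ×ₗ String := fun x =>
    toLex ((let clean := PySem.Str.strip x
            let minutes := pvTimeToMinutes clean
            if minutes ≥ 0 then minutes else 9999), PySem.Str.strip x) with hK
  have hSstrip : ∀ x ∈ S, PySem.Str.strip x = x := by
    intro x hx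
    rw [hS, PySem.Set.mem_ofList] at hx
    obtain ⟨hx1, -⟩ := List.mem_filter.mp hx
    obtain ⟨v, -, rfl⟩ := List.mem_map.mp hx1
    exact pv_str_strip_idem _
  have hVmem : ∀ x ∈ V, 0 ≤ pvTimeToMinutes x ∧ PySem.Str.strip x = x := by
    intro x hx
    obtain ⟨hx1, hx2⟩ := List.mem_filter.mp hx
    exact ⟨by simpa using hx2, hSstrip x hx1⟩
  have hImem : ∀ x ∈ I, pvTimeToMinutes x < 0 ∧ PySem.Str.strip x = x := by
    intro x hx
    obtain ⟨hx1, hx2⟩ := List.mem_filter.mp hx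
    exact ⟨by simpa using hx2, hSstrip x hx1⟩
  have hKvalid : ∀ x ∈ V, K x = KV x := by
    intro x hx
    obtain ⟨h0, hst⟩ := hVmem x hx
    rw [hK, hKV]
    simp only [hst, if_pos h0]
  have hKinv : ∀ x ∈ I, K x = toLex ((9999 : ℤ), x) := by
    intro x hx
    obtain ⟨h0, hst⟩ := hImem x hx
    rw [hK]
    simp only [hst, if_neg (by omega : ¬ pvTimeToMinutes x ≥ 0)]
  have hndS : S.Nodup := PySem.Set.nodup_ofList _
  have hndV : V.Nodup := hndS.filter _
  have hndI : I.Nodup := hndS.filter _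
  have hpermV := PySem.List.sorted_perm V KV false
  have hpermI := PySem.List.sorted_perm I (fun c => c) false
  apply PySem.List.sorted_eq_of_perm_of_pairwise_lt
  · refine (hpermV.append hpermI).trans ?_
    have hIalt : I = S.filter (fun c => !(decide (pvTimeToMinutes c ≥ 0))) := by
      rw [hI]
      exact List.filter_congr (fun x _ => by
        by_cases h : pvTimeToMinutes x ≥ 0 <;> simp [h] <;> omega)
    rw [hIalt, hV]
    exact S.filter_append_perm _
  · rw [List.pairwise_append]
    refine ⟨?_, ?_, ?_⟩
    · have hle := PySem.List.sorted_pairwise V KV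
      have hne : (PySem.List.sorted V KV).Pairwise Ne := (hpermV.nodup_iff).mpr hndV
      refine (hle.and hne).imp_of_mem ?_
      intro a b ha hb hab
      rw [hKvalid a ((PySem.List.mem_sorted _ _ _ _).mp ha), hKvalid b ((PySem.List.mem_sorted _ _ _ _).mp hb)]
      refine lt_of_le_of_ne hab.1 (fun heq => hab.2 ?_)
      simp only [hKV] at heq
      have h2 : (pvTimeToMinutes a, a) = (pvTimeToMinutes b, b) := toLex_inj.mp heq
      exact congrArg Prod.snd h2
    · have hle := PySem.List.sorted_pairwise I (fun c => c)
      have hne : (PySem.List.sorted I (fun c => c)).Pairwise Ne := (hpermI.nodup_iff).mpr hndI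
      refine (hle.and hne).imp_of_mem ?_
      intro a b ha hb hab
      rw [hKinv a ((PySem.List.mem_sorted _ _ _ _).mp ha), hKinv b ((PySem.List.mem_sorted _ _ _ _).mp hb)]
      exact Prod.Lex.toLex_lt_toLex.mpr (Or.inr ⟨rfl, lt_of_le_of_ne hab.1 hab.2⟩)
    · intro a ha b hb
      have haV := (PySem.List.mem_sorted _ _ _ _).mp ha
      have hbI := (PySem.List.mem_sorted _ _ _ _).mp hb
      rw [hKvalid a haV, hKinv b hbI, hKV]
      refine Prod.Lex.toLex_lt_toLex.mpr (Or.inl ?_)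
      rcases pv_ttm_cases a with h | ⟨-, h⟩ <;> omega

-- ===== VERDICT (by name: the statement is the Claim_ definition above) =====
theorem sort_report_departure_times_py_spec : Claim_equal_sort_report_departure_times_py := by
  intro values _
  unfold Spec_sort_report_departure_times_py
  exact pv_main values
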